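-- pv_equiv track=rewrite | github.com/elmhadji/Master_1 | Data Mining/CAH.py | get_min_list
-- ===== SOURCE A (Python) =====
-- def get_min_list (list_of_substruction):
--     min_element = min(list_of_substruction)
--     index_min_element = list_of_substruction.index(min_element)
--     list_of_min_index = [list_of_substruction.index(min_element)]
--     for index in range(index_min_element + 1 , len(list_of_substruction)):
--         if list_of_substruction[index] == min_element and index - 1 != list_of_min_index[-1]:
--             list_of_min_index.append(index)
--     return list_of_min_index
-- ===== SOURCE B (Python) =====
-- def get_min_list(list_of_substruction):
--     min_element = min(list_of_substruction)
--     result = []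
--     run = 0
--     for index, value in enumerate(list_of_substruction):
--         if value == min_element:
--             run += 1
--         else:
--             run = 0
--         if run % 2 == 1:
--             result.append(index)
--     return result
-- ===== Notes on version B (the rewrite author's own statement) =====
-- stated objective: alternative
-- what changed: B drops A's last-kept-index state and the idx-1 comparison entirely: it scans once with a run-length counter of consecutive minimum values and keeps an index exactly when that run length is odd.
import Mathlib
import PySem

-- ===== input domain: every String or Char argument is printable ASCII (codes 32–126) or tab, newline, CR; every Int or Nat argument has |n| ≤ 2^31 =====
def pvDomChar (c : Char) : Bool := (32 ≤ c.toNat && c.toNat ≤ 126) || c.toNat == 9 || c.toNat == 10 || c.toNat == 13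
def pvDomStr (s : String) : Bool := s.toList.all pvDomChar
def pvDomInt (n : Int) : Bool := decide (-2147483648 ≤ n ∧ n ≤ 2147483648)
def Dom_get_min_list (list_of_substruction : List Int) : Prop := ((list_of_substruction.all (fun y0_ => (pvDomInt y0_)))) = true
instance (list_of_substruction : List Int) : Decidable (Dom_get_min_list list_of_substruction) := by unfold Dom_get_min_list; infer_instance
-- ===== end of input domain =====

-- B replaces A's last-kept-index state by a run-length counter of consecutive minima (keep an
-- index iff the run length is odd); alternative single-pass algorithm, same cost.

-- ===== PORT A =====
def get_min_list (list_of_substruction : List Int) : List Int :=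
  match PySem.List.min? list_of_substruction (fun x => x) with
  | none => []   -- unreachable under Pre_ (min([]) raises ValueError)
  | some min_element =>
    match PySem.List.index? list_of_substruction min_element with
    | none => []   -- unreachable: the minimum is in the list
    | some index_min_element =>
      (PySem.List.pyRange ((index_min_element : Int) + 1) (list_of_substruction.length : Int) 1).foldl
        (fun list_of_min_index index =>
          if PySem.List.pyGetD list_of_substruction index 0 = min_element ∧
             index - 1 ≠ PySem.List.pyGetD list_of_min_index (-1) 0 then
            list_of_min_index ++ [index]
          else list_of_min_index)
        [(index_min_element : Int)]

-- ===== PORT B =====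
def get_min_list_alt (list_of_substruction : List Int) : List Int :=
  match PySem.List.min? list_of_substruction (fun x => x) with
  | none => []   -- unreachable under Pre_
  | some min_element =>
    ((PySem.List.enumerate list_of_substruction 0).foldl
      (fun (s : List Int × Int) p =>
        let run := if p.2 = min_element then s.2 + 1 else 0
        (if PySem.Int.mod run 2 = 1 then s.1 ++ [p.1] else s.1, run))
      ([], 0)).1

-- ===== PRECONDITION & SPEC =====
-- Pre_ excludes only the empty list, on which Python's min() raises ValueError in both A and B.
def Pre_get_min_list (list_of_substruction : List Int) : Prop := list_of_substruction ≠ []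
instance (list_of_substruction : List Int) : Decidable (Pre_get_min_list list_of_substruction) := by
  unfold Pre_get_min_list; infer_instance
def pvWitness_get_min_list : List Int := [3, 1, 1, 2, 1, 1, 1]
def Spec_get_min_list (list_of_substruction : List Int) (out : List Int) : Prop :=
  out = get_min_list_alt list_of_substruction
instance (list_of_substruction : List Int) (out : List Int) : Decidable (Spec_get_min_list list_of_substruction out) := by
  unfold Spec_get_min_list; infer_instance

-- ===== CLAIM =====
def Claim_equal_get_min_list : Prop := ∀ (list_of_substruction : List Int), Dom_get_min_list list_of_substruction → Pre_get_min_list list_of_substruction → Spec_get_min_list list_of_substruction (get_min_list list_of_substruction)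

-- ===== LEMMAS AND PROOFS =====

-- A's step function (over index j, looking values up in l).
def stepA (l : List Int) (m : Int) (acc : List Int) (j : Int) : List Int :=
  if PySem.List.pyGetD l j 0 = m ∧ j - 1 ≠ PySem.List.pyGetD acc (-1) 0 then acc ++ [j] else acc

-- B's step function (over index j, looking values up in l), state = (result, run).
def stepB (l : List Int) (m : Int) (s : List Int × Int) (j : Int) : List Int × Int :=
  let run := if PySem.List.pyGetD l j 0 = m then s.2 + 1 else 0
  (if PySem.Int.mod run 2 = 1 then s.1 ++ [j] else s.1, run)

-- Core invariant: over a common index range, A's fold (tracking the last kept index) and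
-- B's fold (tracking the run parity) produce the same list, provided run is odd exactly
-- when the last kept index is j - 1.
lemma core (l : List Int) (m : Int) (c : ℕ) : ∀ (j : ℤ) (acc : List Int) (run last : ℤ),
    PySem.List.pyGetD acc (-1) 0 = last → last < j →
    (run % 2 = 1 ↔ last = j - 1) →
    (PySem.List.pyRange j (j + c) 1).foldl (stepA l m) acc
      = ((PySem.List.pyRange j (j + c) 1).foldl (stepB l m) (acc, run)).1 := by
  induction c with
  | zero => intro j acc run last _ _ _; simp [PySem.List.pyRange_one_eq_nil]
  | succ c ih =>
    intro j acc run last hlast hlt hpar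
    have hcons : PySem.List.pyRange j (j + (c + 1 : ℕ)) 1
        = j :: PySem.List.pyRange (j + 1) (j + (c + 1 : ℕ)) 1 :=
      PySem.List.pyRange_one_cons (by push_cast; omega)
    have hrange : (j : ℤ) + (c + 1 : ℕ) = (j + 1) + (c : ℕ) := by push_cast; ring
    rw [hcons, List.foldl_cons, List.foldl_cons, hrange]
    by_cases hv : PySem.List.pyGetD l j 0 = m
    · by_cases hodd : run % 2 = 1
      · -- run odd: last = j - 1, neither side appends
        have hA : stepA l m acc j = acc := by
          simp [stepA, hv, hlast, (hpar.mp hodd)]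
        have hB : stepB l m (acc, run) j = (acc, run + 1) := by
          simp [stepB, hv]; omega
        rw [hA, hB]
        exact ih (j + 1) acc (run + 1) last hlast (by omega)
          (by constructor <;> intro h <;> omega)
      · -- run even: last ≠ j - 1, both sides append j
        have hne : j - 1 ≠ last := by intro h; exact hodd (hpar.mpr (by omega))
        have hA : stepA l m acc j = acc ++ [j] := by
          simp [stepA, hv, hlast, hne]
        have hB : stepB l m (acc, run) j = (acc ++ [j], run + 1) := by
          simp [stepB, hv]; omega
        rw [hA, hB]
        exact ih (j + 1) (acc ++ [j]) (run + 1) j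
          (PySem.List.pyGetD_neg_one_append_singleton acc j 0)
          (by omega) (by constructor <;> intro h <;> omega)
    · -- not the minimum: A skips, B resets run to 0
      have hA : stepA l m acc j = acc := by simp [stepA, hv]
      have hB : stepB l m (acc, run) j = (acc, 0) := by simp [stepB, hv, PySem.Int.mod]
      rw [hA, hB]
      exact ih (j + 1) acc 0 last hlast (by omega)
        (by constructor <;> intro h <;> omega)

-- Before the first occurrence of the minimum, B's fold stays at ([], 0).
lemma prefix_nil (l : List Int) (m : Int) (c : ℕ) : ∀ (j : ℤ),
    (∀ i ∈ PySem.List.pyRange j (j + c) 1, PySem.List.pyGetD l i 0 ≠ m) →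
    (PySem.List.pyRange j (j + c) 1).foldl (stepB l m) ([], 0) = ([], 0) := by
  induction c with
  | zero => intro j _; simp [PySem.List.pyRange_one_eq_nil]
  | succ c ih =>
    intro j hno
    have hcons : PySem.List.pyRange j (j + (c + 1 : ℕ)) 1
        = j :: PySem.List.pyRange (j + 1) (j + (c + 1 : ℕ)) 1 :=
      PySem.List.pyRange_one_cons (by push_cast; omega)
    have hrange : (j : ℤ) + (c + 1 : ℕ) = (j + 1) + (c : ℕ) := by push_cast; ring
    have hj : PySem.List.pyGetD l j 0 ≠ m := by
      apply hno; rw [hcons]; exact List.mem_cons_self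
    rw [hcons, List.foldl_cons, hrange]
    have hB : stepB l m ([], 0) j = ([], 0) := by simp [stepB, hj, PySem.Int.mod]
    rw [hB]
    apply ih
    intro i hi
    apply hno
    rw [hcons, hrange]
    exact List.mem_cons_of_mem _ hi

theorem get_min_list_spec : Claim_equal_get_min_list := by
  intro l _ hne
  unfold Spec_get_min_list get_min_list get_min_list_alt
  obtain ⟨m, hm⟩ : ∃ m, PySem.List.min? l (fun x => x) = some m := by
    cases h : PySem.List.min? l (fun x => x) with
    | none => rw [PySem.List.min?_eq_none_iff] at h; exact absurd h hne
    | some m => exact ⟨m, rfl⟩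
  have hmem : m ∈ l := PySem.List.min?_mem hm
  obtain ⟨i0, hi0⟩ : ∃ i0, PySem.List.index? l m = some i0 := by
    cases h : PySem.List.index? l m with
    | none => rw [PySem.List.index?_eq_none_iff] at h; exact absurd hmem h
    | some k => exact ⟨k, rfl⟩
  obtain ⟨hlt, hval, hfirst⟩ := PySem.List.getElem_of_index?_eq_some hi0
  simp only [hm, hi0]
  rw [PySem.List.enumerate_eq_map_pyRange (d := 0), List.foldl_map]
  show (PySem.List.pyRange ((i0 : Int) + 1) (l.length : Int) 1).foldl (stepA l m) [(i0 : Int)]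
      = ((PySem.List.pyRange 0 (l.length : Int) 1).foldl (stepB l m) ([], 0)).1
  -- split B's range at i0 and i0 + 1
  have hsplit : PySem.List.pyRange 0 (l.length : Int) 1
      = PySem.List.pyRange 0 (i0 : Int) 1 ++ (i0 : Int) ::
          PySem.List.pyRange ((i0 : Int) + 1) (l.length : Int) 1 := by
    rw [PySem.List.pyRange_one_append 0 (i0 : Int) (l.length : Int) (by positivity)
          (by exact_mod_cast hlt.le),
        PySem.List.pyRange_one_cons (a := (i0 : Int)) (b := (l.length : Int))
          (by exact_mod_cast hlt)]
  rw [hsplit, List.foldl_append, List.foldl_cons]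
  -- B's fold is the identity before the first minimum
  have hpre : (PySem.List.pyRange 0 (i0 : Int) 1).foldl (stepB l m) ([], 0) = ([], 0) := by
    have h0 : (0 : Int) + (i0 : ℕ) = (i0 : Int) := by omega
    rw [← h0]
    apply prefix_nil
    intro i hi
    rw [h0, PySem.List.mem_pyRange_one] at hi
    have hi0' : 0 ≤ i := hi.1
    have hilt : i.toNat < i0 := by omega
    rw [PySem.List.pyGetD_eq_getElem l 0 hi0'
          (by exact_mod_cast lt_of_lt_of_le hi.2 (by exact_mod_cast hlt.le))]
    exact hfirst i.toNat hilt
  rw [hpre]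
  -- at i0 the run becomes 1 and i0 is kept
  have hvi0 : PySem.List.pyGetD l (i0 : Int) 0 = m := by
    rw [PySem.List.pyGetD_eq_getElem l 0 (by positivity) (by exact_mod_cast hlt)]
    simpa using hval
  have hstep0 : stepB l m ([], 0) (i0 : Int) = ([(i0 : Int)], 1) := by
    simp [stepB, hvi0]
  rw [hstep0]
  -- remaining range: apply the core invariant with run = 1, last = i0
  have hrange : (l.length : Int) = ((i0 : Int) + 1) + ((l.length - i0 - 1 : ℕ) : Int) := by
    omega
  rw [hrange]
  exact (core l m (l.length - i0 - 1) ((i0 : Int) + 1) [(i0 : Int)] 1 (i0 : Int)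
    (PySem.List.pyGetD_neg_one_append_singleton [] (i0 : Int) 0)
    (by omega) (by constructor <;> intro h <;> omega))
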